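-- pv_equiv track=rewrite | github.com/street-lab-tech/street-whisper-app | backend/whisper_with_diarization_as_methods.py | writing_comb_res_to_csv
-- ===== SOURCE A (Python) =====
-- def writing_comb_res_to_csv(comb_list_1, comb_list_2):
--     """
--     NOTE: This method is a helper method for CSV writing in the case when
--     user selects "Transcription + Translation".
--
--     This method takes the completed diaritized transcription list result (comb_list_1) and
--     the completed diaritized translation list result (comb_list_2) and creates a list that
--     combines results from both in preparation for CSV writing.
--     """
--     # Step 1: Find which result has the smaller length
--     result_1_len = len(comb_list_1)
--     result_2_len = len(comb_list_2)
--
--     # Step 2: Based on step 1, assign value to res_with_min_length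
--     # If res_with_min_length == 0, both comb_list_1 and comb_list_2 have same length
--     if (result_2_len < result_1_len):
--         length_limit = result_2_len
--         res_with_min_length = 2
--     elif (result_1_len == result_2_len):
--         length_limit = result_1_len
--         res_with_min_length = 0
--     else:
--         length_limit = result_1_len
--         res_with_min_length = 1
--
--     # Step 2: Create a list of list object starting from length 0 up to the length_limit
--     # Writing content from both objects into this list
--     comb_csv_content = []
--     for i in range(0, length_limit):
--         row_in_res_1 = comb_list_1[i]
--         row_in_res_2 = comb_list_2[i]
--         row_to_combine = row_in_res_1.copy()
--         row_to_combine.append(row_in_res_2[2])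
--         comb_csv_content.append(row_to_combine)
--
--     # Step 3: Populate the rest of comb_csv_content with remaining content from the longer of the 2 list objects
--     if (res_with_min_length == 1):
--         # There is some content in comb_list_2 that has not been added to comb_csv_content
--         for i in range(length_limit, result_2_len):
--             row_in_res_2 = comb_list_2[i]
--             row_to_combine = row_in_res_2.copy()
--             row_to_combine.append(row_in_res_2[2])
--             row_to_combine[2] = "N/A" # No more content from comb_list_1, so 3rd entry of row is N/A
--
--     elif (res_with_min_length == 2):
--         # There is some content in comb_list_1 that has not been added to comb_csv_content
--         for i in range(length_limit, result_1_len):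
--             row_in_res_1 = comb_list_1[i]
--             row_to_combine = row_in_res_1.copy()
--             row_to_combine.append("N/A") # No more content from comb_list_2, so 3rd entry of row is N/A
--             comb_csv_content.append(row_to_combine)
--
--     return comb_csv_content
-- ===== SOURCE B (Python) =====
-- def writing_comb_res_to_csv(comb_list_1, comb_list_2):
--     # Simultaneous structural recursion on both lists: peel one row off each
--     # per step; when the translation list runs out, fill with "N/A".
--     if not comb_list_1:
--         return []
--     if not comb_list_2:
--         return [comb_list_1[0] + ["N/A"]] + writing_comb_res_to_csv(comb_list_1[1:], [])
--     return [comb_list_1[0] + [comb_list_2[0][2]]] + writing_comb_res_to_csv(comb_list_1[1:], comb_list_2[1:])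
-- ===== Notes on version B (the rewrite author's own statement) =====
-- stated objective: alternative
-- what changed: B is a simultaneous structural recursion that pattern-matches on the heads of both lists and recurses on their tails, replacing A's length comparison/classification, its index-based main loop over range(length_limit) and the two special-cased tail loops; no lengths or indices are computed at all
import Mathlib
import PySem

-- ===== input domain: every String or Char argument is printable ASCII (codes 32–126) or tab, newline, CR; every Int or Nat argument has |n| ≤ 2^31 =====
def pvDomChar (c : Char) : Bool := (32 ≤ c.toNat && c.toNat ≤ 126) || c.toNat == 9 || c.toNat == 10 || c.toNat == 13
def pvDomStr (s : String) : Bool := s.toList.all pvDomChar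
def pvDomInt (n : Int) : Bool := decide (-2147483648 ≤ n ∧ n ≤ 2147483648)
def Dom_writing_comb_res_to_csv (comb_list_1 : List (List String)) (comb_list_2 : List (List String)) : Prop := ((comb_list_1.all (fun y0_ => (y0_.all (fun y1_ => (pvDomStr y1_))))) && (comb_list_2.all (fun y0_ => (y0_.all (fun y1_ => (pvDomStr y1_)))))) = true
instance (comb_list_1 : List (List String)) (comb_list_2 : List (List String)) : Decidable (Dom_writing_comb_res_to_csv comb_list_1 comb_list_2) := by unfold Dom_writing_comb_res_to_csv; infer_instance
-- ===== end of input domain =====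

-- ===== PORT A =====
-- B replaces A's length classification + three index loops by simultaneous structural
-- recursion on both lists (objective: alternative). Equal on Pre_; no observable mutation.
-- Port of A. In-range indexing ported with getD (the loops only index in range);
-- comb_list_2[i][2] is getD 2 "" and Pre_ excludes exactly the rows where Python raises
-- IndexError. The 'res_with_min_length == 1' branch builds rows it never appends, so it
-- has no effect on the result.
def writing_comb_res_to_csv (comb_list_1 : List (List String)) (comb_list_2 : List (List String)) : List (List String) :=
  let result_1_len := comb_list_1.length
  let result_2_len := comb_list_2.length
  let p : Nat × Nat :=
    if result_2_len < result_1_len then (result_2_len, 2)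
    else if result_1_len = result_2_len then (result_1_len, 0)
    else (result_1_len, 1)
  let comb_csv_content :=
    (List.range p.1).foldl (fun acc i =>
      let row_in_res_1 := comb_list_1.getD i []
      let row_in_res_2 := comb_list_2.getD i []
      acc ++ [row_in_res_1 ++ [row_in_res_2.getD 2 ""]]) []
  if p.2 = 2 then
    (List.range' p.1 (result_1_len - p.1)).foldl (fun acc i =>
      acc ++ [comb_list_1.getD i [] ++ ["N/A"]]) comb_csv_content
  else
    comb_csv_content

-- ===== PORT B =====
-- Port of B: structural recursion on both lists; l2[0][2] is getD 2 "" (Pre_ keeps it in range).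
def writing_comb_res_to_csv_alt (comb_list_1 : List (List String)) (comb_list_2 : List (List String)) : List (List String) :=
  match comb_list_1, comb_list_2 with
  | [], _ => []
  | r1 :: t1, [] => (r1 ++ ["N/A"]) :: writing_comb_res_to_csv_alt t1 []
  | r1 :: t1, r2 :: t2 => (r1 ++ [r2.getD 2 ""]) :: writing_comb_res_to_csv_alt t1 t2

-- ===== PRECONDITION & SPEC =====
-- Pre_: A indexes row[2] of every row of comb_list_2 (in the main loop or in its dead tail
-- loop), so it raises IndexError exactly when some row of comb_list_2 has fewer than 3 entries.
def Pre_writing_comb_res_to_csv (comb_list_1 : List (List String)) (comb_list_2 : List (List String)) : Prop :=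
  ∀ r ∈ comb_list_2, 3 ≤ r.length
instance (comb_list_1 : List (List String)) (comb_list_2 : List (List String)) : Decidable (Pre_writing_comb_res_to_csv comb_list_1 comb_list_2) := by unfold Pre_writing_comb_res_to_csv; infer_instance
def pvWitness_writing_comb_res_to_csv : List (List String) × List (List String) :=
  ([["a", "b"], ["c", "d"]], [["x", "y", "z"]])

def Spec_writing_comb_res_to_csv (comb_list_1 : List (List String)) (comb_list_2 : List (List String)) (out : List (List String)) : Prop := out = writing_comb_res_to_csv_alt comb_list_1 comb_list_2
instance (comb_list_1 : List (List String)) (comb_list_2 : List (List String)) (out : List (List String)) : Decidable (Spec_writing_comb_res_to_csv comb_list_1 comb_list_2 out) := by unfold Spec_writing_comb_res_to_csv; infer_instance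

-- ===== CLAIM (what is proved, stated in full; the proofs are below) =====
def Claim_equal_writing_comb_res_to_csv : Prop := ∀ (comb_list_1 : List (List String)) (comb_list_2 : List (List String)), Dom_writing_comb_res_to_csv comb_list_1 comb_list_2 → Pre_writing_comb_res_to_csv comb_list_1 comb_list_2 → Spec_writing_comb_res_to_csv comb_list_1 comb_list_2 (writing_comb_res_to_csv comb_list_1 comb_list_2)

-- ===== LEMMAS AND PROOFS =====

-- index-based characterisation shared by both proofs
def pvMapForm (l1 l2 : List (List String)) : List (List String) :=
  (List.range l1.length).map (fun i =>
    l1.getD i [] ++ [if i < l2.length then (l2.getD i []).getD 2 "" else "N/A"])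

theorem range_split (n m : Nat) (h : n ≤ m) : List.range m = List.range n ++ List.range' n (m - n) := by
  have h2 := List.range'_append (s := 0) (m := n) (n := m - n) (step := 1)
  simp only [Nat.zero_add, Nat.one_mul] at h2
  rw [List.range_eq_range', List.range_eq_range', h2, Nat.add_sub_cancel' h]

theorem a_eq_mapForm (l1 l2 : List (List String)) :
    writing_comb_res_to_csv l1 l2 = pvMapForm l1 l2 := by
  unfold writing_comb_res_to_csv pvMapForm
  dsimp only
  by_cases hlt : l2.length < l1.length
  · rw [if_pos hlt]
    simp only [PySem.List.foldl_append_singleton_eq_map, List.nil_append, if_true]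
    rw [range_split l2.length l1.length (le_of_lt hlt), List.map_append]
    congr 1
    · exact List.map_congr_left fun i hi => by
        simp only [List.mem_range] at hi; simp [hi]
    · exact List.map_congr_left fun i hi => by
        have := (List.mem_range'_1.mp hi).1
        simp [Nat.not_lt.mpr this]
  · rw [if_neg hlt]
    have base : (List.range l1.length).foldl (fun acc i =>
          acc ++ [l1.getD i [] ++ [(l2.getD i []).getD 2 ""]]) [] =
        (List.range l1.length).map (fun i =>
          l1.getD i [] ++ [if i < l2.length then (l2.getD i []).getD 2 "" else "N/A"]) := by
      simp only [PySem.List.foldl_append_singleton_eq_map, List.nil_append]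
      exact List.map_congr_left fun i hi => by
        simp only [List.mem_range] at hi
        simp [show i < l2.length by omega]
    by_cases heq : l1.length = l2.length
    · rw [if_pos heq]
      dsimp only
      rw [if_neg (by omega : ¬ (0 : Nat) = 2)]
      rw [heq] at base ⊢
      exact base
    · rw [if_neg heq]
      dsimp only
      rw [if_neg (by omega : ¬ (1 : Nat) = 2)]
      exact base

theorem b_eq_mapForm (l1 l2 : List (List String)) :
    writing_comb_res_to_csv_alt l1 l2 = pvMapForm l1 l2 := by
  induction l1 generalizing l2 with
  | nil => cases l2 <;> simp [writing_comb_res_to_csv_alt, pvMapForm]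
  | cons r1 t1 ih =>
    cases l2 with
    | nil =>
      simp only [writing_comb_res_to_csv_alt, ih, pvMapForm, List.length_cons,
        List.range_succ_eq_map, List.map_cons, List.map_map]
      simp
    | cons r2 t2 =>
      simp only [writing_comb_res_to_csv_alt, ih, pvMapForm, List.length_cons,
        List.range_succ_eq_map, List.map_cons, List.map_map]
      simp [Function.comp_def, Nat.succ_lt_succ_iff]

-- ===== VERDICT (by name: the statement is the Claim_ definition above) =====
theorem writing_comb_res_to_csv_spec : Claim_equal_writing_comb_res_to_csv := by
  intro l1 l2 _ _
  rw [Spec_writing_comb_res_to_csv, a_eq_mapForm, b_eq_mapForm]
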